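-- pv_equiv track=rewrite | github.com/EliasTuning/GlobalsFinder | src/find_a9.py | hex_pattern_to_regex
-- ===== SOURCE A (Python) =====
-- def hex_pattern_to_regex(hex_pattern: str) -> str:
--     """
--     Convert a hex-like string with '.' wildcards into a regex byte string.
--
--     This method converts hex patterns with wildcard dots into regex patterns
--     suitable for Ghidra's findBytes method. Consecutive dots are compressed
--     into regex quantifiers for efficiency.
--
--     Args:
--         hex_pattern: The hex pattern string with dots as wildcards. Must not be None.
--
--     Returns:
--         str: The regex pattern string with escaped hex bytes and quantifiers
--
--     Raises:
--         ValueError: If hex pattern has odd length (except for dots)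
--         AssertionError: If hex_pattern is None
--
--     Example:
--         "82f2........0000" -> "\\x82\\xF2.{8}\\x00\\x00"
--         "aa....bb"        -> "\\xAA.{4}\\xBB"
--     """
--     assert hex_pattern is not None, "hex_pattern must not be None"
--     result = []
--     i = 0
--     while i < len(hex_pattern):
--         if hex_pattern[i] == '.':
--             # Count consecutive dots
--             dot_count = 1
--             while i + dot_count < len(hex_pattern) and hex_pattern[i + dot_count] == '.':
--                 dot_count += 1
--             if dot_count == 1:
--                 result.append('.')  # single dot = . (any byte)
--             else:
--                 result.append(f".{{{dot_count}}}")  # regex quantifier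
--             i += dot_count
--         else:
--             # Make sure we have a full hex byte
--             if i + 1 >= len(hex_pattern):
--                 raise ValueError("Hex string length must be even (except for dots)")
--             result.append(f"\\x{hex_pattern[i:i + 2]}")
--             i += 2
--     return ''.join(result)
-- ===== SOURCE B (Python) =====
-- def hex_pattern_to_regex(hex_pattern: str) -> str:
--     """Single-pass state-machine rewrite: one fold over the characters with a
--     pending half-byte and a running dot count, instead of index jumps with an
--     inner dot-counting loop."""
--     assert hex_pattern is not None, "hex_pattern must not be None"
--     parts = []
--     pending = None   # first character of a byte awaiting its partner
--     dots = 0         # length of the current run of wildcard dots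
--     for c in hex_pattern:
--         if pending is not None:
--             parts.append('\\x' + pending + c)
--             pending = None
--         elif c == '.':
--             dots += 1
--         else:
--             if dots:
--                 parts.append('.' if dots == 1 else '.{%d}' % dots)
--                 dots = 0
--             pending = c
--     if dots:
--         parts.append('.' if dots == 1 else '.{%d}' % dots)
--     if pending is not None:
--         raise ValueError("Hex string length must be even (except for dots)")
--     return ''.join(parts)
-- ===== Notes on version B (the rewrite author's own statement) =====
-- stated objective: alternative
-- what changed: Replaced the index-jumping while loop with an inner dot-counting loop and string slicing by a single left-to-right fold over the characters carrying a pending half-byte and a running dot count.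
import Mathlib
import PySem

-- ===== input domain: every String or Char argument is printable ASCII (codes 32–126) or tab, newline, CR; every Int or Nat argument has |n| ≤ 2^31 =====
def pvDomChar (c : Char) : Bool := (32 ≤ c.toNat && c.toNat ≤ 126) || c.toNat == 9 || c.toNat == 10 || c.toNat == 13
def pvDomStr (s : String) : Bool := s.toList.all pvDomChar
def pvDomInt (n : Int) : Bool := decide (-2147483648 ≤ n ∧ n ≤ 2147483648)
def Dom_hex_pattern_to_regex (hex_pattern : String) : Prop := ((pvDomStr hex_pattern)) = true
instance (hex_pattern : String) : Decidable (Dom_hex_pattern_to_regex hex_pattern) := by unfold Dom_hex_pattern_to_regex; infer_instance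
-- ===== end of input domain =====

-- B replaces A's index-jumping loop (with an inner dot-counting loop and slicing) by a
-- single fold over the characters carrying a pending half-byte and a running dot count
-- (objective: alternative decomposition, same cost).

-- ===== PORT A =====
-- inner `while` counting the consecutive dots AFTER position i (dot_count = 1 + this)
def pvCountDots : List Char → Nat
  | [] => 0
  | c :: rest => if c = '.' then 1 + pvCountDots rest else 0

-- the outer while loop, as structural recursion on the remaining characters;
-- `none` marks the `raise ValueError` branch (excluded by Pre_)
def pvGoA (l : List Char) : Option (List String) :=
  match h : l with
  | [] => some []
  | c :: rest =>
    if c = '.' then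
      let dot_count := 1 + pvCountDots rest
      let tok := if dot_count = 1 then "." else ".{" ++ toString dot_count ++ "}"
      match pvGoA (rest.drop (dot_count - 1)) with
      | none => none
      | some ts => some (tok :: ts)
    else
      match rest with
      | [] => none
      | d :: rest' =>
        match pvGoA rest' with
        | none => none
        | some ts => some (("\\x" ++ String.mk [c, d]) :: ts)
termination_by l.length
decreasing_by
  all_goals simp [h]

def hex_pattern_to_regex (hex_pattern : String) : String :=
  match pvGoA hex_pattern.toList with
  | none => ""          -- Python raises ValueError here (outside Pre_)
  | some ts => String.join ts

-- ===== PORT B =====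
-- flush the current dot run as a token ('.' or '.{n}')
def pvFlush (parts : List String) (dots : Nat) : List String :=
  if dots = 0 then parts
  else parts ++ [if dots = 1 then "." else ".{" ++ toString dots ++ "}"]

-- one step of B's for-loop; state = (parts, pending half-byte, dot-run length)
def pvStepB : List String × Option Char × Nat → Char → List String × Option Char × Nat
  | (parts, some h, dots), c => (parts ++ ["\\x" ++ String.mk [h, c]], none, dots)
  | (parts, none, dots), c =>
    if c = '.' then (parts, none, dots + 1)
    else (pvFlush parts dots, some c, 0)

def hex_pattern_to_regex_alt (hex_pattern : String) : String :=
  let st := hex_pattern.toList.foldl pvStepB ([], none, 0)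
  match st.2.1 with
  | some _ => ""        -- Python raises ValueError here (outside Pre_)
  | none => String.join (pvFlush st.1 st.2.2)

-- ===== PRECONDITION & SPEC =====
-- Pre_ excludes exactly the inputs on which A raises ValueError: those ending with a
-- lone character that starts a hex byte and has no second character (checked by a
-- simple parity-of-pending scan over the characters, not by running either port).
def pvHalfOpen (l : List Char) : Bool :=
  l.foldl (fun p c => if p then false else decide (c ≠ '.')) false

def Pre_hex_pattern_to_regex (hex_pattern : String) : Prop :=
  pvHalfOpen hex_pattern.toList = false
instance (hex_pattern : String) : Decidable (Pre_hex_pattern_to_regex hex_pattern) := by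
  unfold Pre_hex_pattern_to_regex; infer_instance

def pvWitness_hex_pattern_to_regex : String := "82f2....a.00"

def Spec_hex_pattern_to_regex (hex_pattern : String) (out : String) : Prop := out = hex_pattern_to_regex_alt hex_pattern
instance (hex_pattern : String) (out : String) : Decidable (Spec_hex_pattern_to_regex hex_pattern out) := by unfold Spec_hex_pattern_to_regex; infer_instance

-- ===== CLAIM (what is proved, stated in full; the proofs are below) =====
def Claim_equal_hex_pattern_to_regex : Prop := ∀ (hex_pattern : String), Dom_hex_pattern_to_regex hex_pattern → Pre_hex_pattern_to_regex hex_pattern → Spec_hex_pattern_to_regex hex_pattern (hex_pattern_to_regex hex_pattern)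

-- ===== LEMMAS AND PROOFS =====

-- proof-side view of B: run the fold from `parts`, then finish (none = raise)
def pvRunB (parts : List String) (l : List Char) : Option (List String) :=
  let st := l.foldl pvStepB (parts, none, 0)
  match st.2.1 with
  | some _ => none
  | none => some (pvFlush st.1 st.2.2)

lemma pvCountDots_take (l : List Char) :
    l.take (pvCountDots l) = List.replicate (pvCountDots l) '.' := by
  induction l with
  | nil => simp [pvCountDots]
  | cons c rest ih =>
    by_cases hc : c = '.'
    · subst hc
      simp only [pvCountDots, if_true, show 1 + pvCountDots rest = pvCountDots rest + 1 from by omega]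
      simp [List.replicate_succ, ih]
    · simp [pvCountDots, hc]

lemma pvCountDots_drop_head (l : List Char) (c : Char) (rest : List Char)
    (h : l.drop (pvCountDots l) = c :: rest) : c ≠ '.' := by
  induction l generalizing c rest with
  | nil => simp at h
  | cons a tl ih =>
    by_cases ha : a = '.'
    · simp only [pvCountDots, if_pos ha,
        show 1 + pvCountDots tl = pvCountDots tl + 1 from by omega, List.drop_succ_cons] at h
      exact ih _ _ h
    · simp only [pvCountDots, if_neg ha, List.drop_zero, List.cons.injEq] at h
      intro hc; exact ha (h.1 ▸ hc ▸ rfl)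

-- folding a run of dots from a no-pending state just increments the dot count
lemma pvFold_dots (k : Nat) (parts : List String) (d : Nat) (rest : List Char) :
    (List.replicate k '.' ++ rest).foldl pvStepB (parts, none, d)
      = rest.foldl pvStepB (parts, none, d + k) := by
  induction k generalizing d with
  | zero => simp
  | succ n ih =>
    simp only [List.replicate_succ, List.cons_append, List.foldl_cons, pvStepB, if_pos rfl, if_true]
    rw [ih]
    ring_nf

-- the two parses agree, with B's accumulated `parts` prepended (fuel-bounded induction)
lemma pvRunB_eq_aux (n : Nat) : ∀ (l : List Char), l.length ≤ n → ∀ parts : List String,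
    pvRunB parts l = (pvGoA l).map (fun ts => parts ++ ts) := by
  induction n with
  | zero =>
    intro l hl parts
    match l with
    | [] => simp [pvRunB, pvGoA, pvFlush]
  | succ n ih =>
    intro l hl parts
    match l with
    | [] => simp [pvRunB, pvGoA, pvFlush]
    | c :: rest =>
      by_cases hc : c = '.'
      · subst hc
        have hsplit : rest = List.replicate (pvCountDots rest) '.' ++ rest.drop (pvCountDots rest) := by
          conv_lhs => rw [← List.take_append_drop (pvCountDots rest) rest]
          rw [pvCountDots_take]
        set k := pvCountDots rest with hk
        simp only [pvRunB, List.foldl_cons, pvStepB, if_pos rfl, if_true]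
        conv_lhs => rw [hsplit]
        rw [show (0 : Nat) + 1 = 1 from rfl, pvFold_dots]
        have htok : pvFlush parts (1 + k)
            = parts ++ [if 1 + k = 1 then "." else ".{" ++ toString (1 + k) ++ "}"] := by
          simp [pvFlush]
        cases hdrop : rest.drop k with
        | nil =>
          simp only [List.foldl_nil]
          rw [pvGoA.eq_def]
          simp only [if_pos rfl]
          rw [show (1 + pvCountDots rest - 1) = k from by omega, hdrop]
          rw [pvGoA.eq_def]
          simp [htok, ← hk]
        | cons c2 rest2 =>
          have hc2 : c2 ≠ '.' := pvCountDots_drop_head rest c2 rest2 hdrop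
          simp only [List.foldl_cons, pvStepB, if_neg hc2]
          cases rest2 with
          | nil =>
            simp only [List.foldl_nil]
            rw [pvGoA.eq_def]
            simp only [if_pos rfl]
            rw [show (1 + pvCountDots rest - 1) = k from by omega, hdrop]
            rw [pvGoA.eq_def]
            simp [if_neg hc2]
          | cons d rest3 =>
            simp only [List.foldl_cons, pvStepB]
            have hle : rest3.length ≤ n := by
              have hlen := congrArg List.length hsplit
              rw [hdrop] at hlen
              simp at hlen hl
              omega
            rw [pvGoA.eq_def]
            simp only [if_pos rfl]
            rw [show (1 + pvCountDots rest - 1) = k from by omega, hdrop]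
            rw [pvGoA.eq_def]
            simp only [if_neg hc2]
            have hih := ih rest3 hle (pvFlush parts (1 + k) ++ ["\\x" ++ String.mk [c2, d]])
            simp only [pvRunB] at hih
            rw [hih]
            cases hG : pvGoA rest3 with
            | none => simp
            | some ts => simp [htok, ← hk]
      · simp only [pvRunB, List.foldl_cons, pvStepB, if_neg hc]
        cases rest with
        | nil =>
          simp only [List.foldl_nil]
          rw [pvGoA.eq_def]
          simp [if_neg hc]
        | cons d rest' =>
          simp only [List.foldl_cons, pvStepB]
          have hle : rest'.length ≤ n := by simp at hl; omega
          rw [pvGoA.eq_def]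
          simp only [if_neg hc]
          have hih := ih rest' hle (pvFlush parts 0 ++ ["\\x" ++ String.mk [c, d]])
          simp only [pvRunB] at hih
          rw [hih]
          cases hG : pvGoA rest' with
          | none => simp
          | some ts => simp [pvFlush]

lemma pv_total_eq (s : String) : hex_pattern_to_regex s = hex_pattern_to_regex_alt s := by
  have h := pvRunB_eq_aux s.toList.length s.toList le_rfl []
  simp only [pvRunB] at h
  simp only [hex_pattern_to_regex, hex_pattern_to_regex_alt]
  cases hst : (s.toList.foldl pvStepB ([], none, 0)).2.1 with
  | some x =>
    rw [hst] at h
    cases hA : pvGoA s.toList with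
    | none => simp [hA]
    | some ts => rw [hA] at h; simp at h
  | none =>
    rw [hst] at h
    cases hA : pvGoA s.toList with
    | none => rw [hA] at h; simp at h
    | some ts =>
      rw [hA] at h
      simp only [Option.map_some, Option.some.injEq, List.nil_append] at h
      simp [h]

-- ===== VERDICT (by name: the statement is the Claim_ definition above) =====
theorem hex_pattern_to_regex_spec : Claim_equal_hex_pattern_to_regex := by
  intro s _ _
  unfold Spec_hex_pattern_to_regex
  exact pv_total_eq s
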